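-- pv_equiv track=rewrite | github.com/hmnhGeek/Ciphers | Transposition Ciphers/Myszkowski Cipher/ranks.py | fetch_ranks
-- ===== SOURCE A (Python) =====
-- def get_ranks(ords):
--     distincts = []
--
--     for ORD in ords:
--         if ORD not in distincts:
--             distincts.append(ORD)
--
--     distincts.sort()
--
--     starter = 1
--     rankings = {}
--
--     for i in distincts:
--         rankings.update({i:starter})
--         starter += 1
--
--     return rankings
--
-- def fetch_ranks(keyword):
--
--     keyword = keyword.upper()
--
--     chars = [char for char in keyword]
--
--     ordinates = []
--     copy = []
--     for char in chars:
--         ordinates.append(ord(char))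
--         copy.append(ord(char))
--
--     ranks = get_ranks(copy)
--
--     for i in range(len(ordinates)):
--         ordinates[i] = ranks[ordinates[i]]
--
--     return ordinates
-- ===== SOURCE B (Python) =====
-- def fetch_ranks(keyword):
--     keyword = keyword.upper()
--     ords = [ord(c) for c in keyword]
--     distinct = set(ords)
--     return [1 + sum(1 for d in distinct if d < o) for o in ords]
-- ===== Notes on version B (the rewrite author's own statement) =====
-- stated objective: alternative
-- what changed: Instead of sorting the distinct ordinals and building a rank dictionary, B computes each rank directly as 1 plus the number of distinct ordinals strictly smaller than the character's ordinal.
import Mathlib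
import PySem

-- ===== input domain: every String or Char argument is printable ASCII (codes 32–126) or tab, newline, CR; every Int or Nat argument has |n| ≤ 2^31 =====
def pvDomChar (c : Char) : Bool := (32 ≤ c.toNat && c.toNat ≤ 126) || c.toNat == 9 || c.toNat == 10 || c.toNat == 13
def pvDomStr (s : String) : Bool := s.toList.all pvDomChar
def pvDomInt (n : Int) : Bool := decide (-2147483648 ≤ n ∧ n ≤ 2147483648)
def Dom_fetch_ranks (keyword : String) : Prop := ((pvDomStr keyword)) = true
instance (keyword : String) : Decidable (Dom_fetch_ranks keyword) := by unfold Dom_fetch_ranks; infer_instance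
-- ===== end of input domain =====

-- B replaces A's sort-then-rank-dictionary by a direct count of strictly smaller distinct ordinals (alternative decomposition, similar cost).

-- ===== PORT A =====
def get_ranks (ords : List Int) : PySem.Dict Int Int :=
  let distincts : List Int := ords.foldl (fun acc o => if o ∈ acc then acc else acc ++ [o]) []
  let distincts := PySem.List.sorted distincts (fun x => x) false
  (distincts.foldl (fun (p : PySem.Dict Int Int × Int) i => (p.1.insert i p.2, p.2 + 1))
    (PySem.Dict.empty, 1)).1

def fetch_ranks (keyword : String) : List Int :=
  let kw := PySem.Str.upper keyword
  let chars := kw.toList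
  let ordinates : List Int := chars.foldl (fun acc c => acc ++ [(c.toNat : Int)]) []
  let copy : List Int := chars.foldl (fun acc c => acc ++ [(c.toNat : Int)]) []
  let ranks := get_ranks copy
  -- 'ordinates[i] = ranks[ordinates[i]]' reads only the untouched slot i: elementwise map;
  -- the dict lookup always succeeds (every ordinal is a key), so getD 0 is exact here
  ordinates.map (fun o => ranks.getD o 0)

-- ===== PORT B =====
def fetch_ranks_alt (keyword : String) : List Int :=
  let ords : List Int := (PySem.Str.upper keyword).toList.map (fun c => (c.toNat : Int))
  let distinct : PySem.Set Int := PySem.Set.ofList ords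
  ords.map (fun o => 1 + ((distinct.countP (fun d => decide (d < o)) : Nat) : Int))

-- ===== PRECONDITION & SPEC =====
def Spec_fetch_ranks (keyword : String) (out : List Int) : Prop := out = fetch_ranks_alt keyword
instance (keyword : String) (out : List Int) : Decidable (Spec_fetch_ranks keyword out) := by unfold Spec_fetch_ranks; infer_instance

-- ===== CLAIM (what is proved, stated in full; the proofs are below) =====
def Claim_equal_fetch_ranks : Prop := ∀ (keyword : String), Dom_fetch_ranks keyword → Spec_fetch_ranks keyword (fetch_ranks keyword)

-- ===== LEMMAS AND PROOFS =====

-- A's dedup loop is exactly PySem.Set.ofList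
theorem pv_dedup_eq_ofList (ords : List Int) :
    ords.foldl (fun acc o => if o ∈ acc then acc else acc ++ [o]) [] = PySem.Set.ofList ords := by
  rw [PySem.Set.ofList_eq_foldl]
  apply PySem.List.foldl_congr_mem
  intro acc x _
  simp [PySem.Set.add, PySem.Set.contains]

-- the rank-dict fold never touches keys not in the list
theorem pv_getD_fold_of_not_mem (l : List Int) (o : Int) (ho : o ∉ l)
    (d : PySem.Dict Int Int) (s : Int) :
    ((l.foldl (fun (p : PySem.Dict Int Int × Int) i => (p.1.insert i p.2, p.2 + 1)) (d, s)).1).getD o 0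
      = d.getD o 0 := by
  induction l generalizing d s with
  | nil => rfl
  | cons h t ih =>
    simp only [List.foldl_cons]
    have ho' : o ≠ h ∧ o ∉ t := by simpa [not_or] using ho
    rw [ih ho'.2 (d.insert h s) (s + 1)]
    rw [PySem.Dict.getD_insert]
    simp [ho'.1]

-- on a strictly increasing list, a member's rank is start + (number of smaller elements)
theorem pv_getD_fold_rank (l : List Int) (hl : l.Pairwise (· < ·)) (o : Int) (ho : o ∈ l)
    (d : PySem.Dict Int Int) (s : Int) :
    ((l.foldl (fun (p : PySem.Dict Int Int × Int) i => (p.1.insert i p.2, p.2 + 1)) (d, s)).1).getD o 0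
      = s + (l.countP (fun x => decide (x < o)) : Int) := by
  induction l generalizing d s with
  | nil => cases ho
  | cons h t ih =>
    simp only [List.foldl_cons]
    rcases List.mem_cons.mp ho with rfl | hot
    · have hnt : o ∉ t := fun hm => lt_irrefl o ((List.pairwise_cons.mp hl).1 o hm)
      rw [pv_getD_fold_of_not_mem t o hnt]
      rw [PySem.Dict.getD_insert_self]
      have : t.countP (fun x => decide (x < o)) = 0 := by
        rw [List.countP_eq_zero]
        intro x hx
        simpa using not_lt_of_gt ((List.pairwise_cons.mp hl).1 x hx)
      simp [this]
    · have hho : h < o := (List.pairwise_cons.mp hl).1 o hot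
      rw [ih (List.pairwise_cons.mp hl).2 hot]
      simp [hho]
      ring

theorem fetch_ranks_eq_alt (keyword : String) : fetch_ranks keyword = fetch_ranks_alt keyword := by
  unfold fetch_ranks fetch_ranks_alt get_ranks
  simp only [PySem.List.foldl_append_singleton_eq_map, List.nil_append, pv_dedup_eq_ofList]
  set ords : List Int := (PySem.Str.upper keyword).toList.map (fun c => (c.toNat : Int)) with hords
  apply List.map_congr_left
  intro o ho
  have hmem : o ∈ PySem.List.sorted (PySem.Set.ofList ords) (fun x => x) false := by
    rw [PySem.List.mem_sorted]
    exact (PySem.Set.mem_ofList _ _).mpr ho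
  rw [pv_getD_fold_rank _ (PySem.List.sorted_ofList_pairwise_lt ords) o hmem]
  have hperm : (PySem.List.sorted (PySem.Set.ofList ords) (fun x => x) false).Perm (PySem.Set.ofList ords) :=
    PySem.List.sorted_perm _ _ _
  rw [hperm.countP_eq]

-- ===== VERDICT (by name: the statement is the Claim_ definition above) =====
theorem fetch_ranks_spec : Claim_equal_fetch_ranks := by
  intro keyword _
  unfold Spec_fetch_ranks
  exact fetch_ranks_eq_alt keyword
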